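-- pv_equiv track=rewrite | github.com/NotFish232/Leetcode | src/python_solutions/3676_count-bowl-subarrays.py | bowlSubarrays
-- ===== SOURCE A (Python) =====
-- from typing import List
--
-- def bowlSubarrays(nums: List[int]) -> int:
--     n = len(nums)
--
--     l_maxes = [0] * (n + 1)
--     r_maxes = [0] * (n + 1)
--
--     for i in range(n):
--         l_maxes[i + 1] = max(l_maxes[i], nums[i])
--     for i in reversed(range(n)):
--         r_maxes[i] = max(r_maxes[i + 1], nums[i])
--
--     ans = 0
--
--     for i in range(1, n - 1):
--         if nums[i] < l_maxes[i] and nums[i] < r_maxes[i + 1]: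
--             ans += 1
--
--     return ans
-- ===== SOURCE B (Python) =====
-- from typing import List
--
-- def bowlSubarrays(nums: List[int]) -> int:
--     return sum(
--         1
--         for i in range(1, len(nums) - 1)
--         if any(nums[j] > nums[i] for j in range(i))
--         and any(nums[j] > nums[i] for j in range(i + 1, len(nums)))
--     )
-- ===== Notes on version B (the rewrite author's own statement) =====
-- stated objective: simpler
-- what changed: B replaces A's two precomputed prefix/suffix max arrays and final scan by a single comprehension that tests each interior element directly with existential scans (any strictly greater element to the left and to the right).
-- intended difference: On lists with an interior negative element that is >= every element on one of its sides, A still counts that element as a bowl (its max arrays are initialised with 0, so a negative value is always 'below the side maximum'), while B counts only elements with a strictly greater element on both sides, which is the intended bowl condition; e.g. on [-5,-2,-5] A returns 1, B returns 0. — e.g. on bowlSubarrays([-5, -2, -5]): A returns 1, B returns 0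
import Mathlib
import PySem

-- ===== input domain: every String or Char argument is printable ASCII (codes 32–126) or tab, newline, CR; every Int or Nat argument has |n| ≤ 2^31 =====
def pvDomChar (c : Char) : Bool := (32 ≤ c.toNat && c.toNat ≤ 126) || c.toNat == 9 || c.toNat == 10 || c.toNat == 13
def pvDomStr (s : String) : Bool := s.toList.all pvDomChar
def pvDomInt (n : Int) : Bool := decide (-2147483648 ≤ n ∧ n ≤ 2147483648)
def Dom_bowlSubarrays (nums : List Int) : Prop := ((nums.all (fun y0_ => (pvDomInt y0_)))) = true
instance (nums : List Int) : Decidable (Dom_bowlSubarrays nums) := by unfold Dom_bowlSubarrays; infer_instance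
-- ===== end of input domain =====

-- B replaces A's precomputed prefix/suffix max arrays by direct existential scans per interior
-- element (simpler one-expression form); on lists with an interior negative element that has no
-- strictly greater element on one side, A (whose max arrays start at 0) counts it and B does not
-- (stated as the intended difference D_ below).

-- ===== PORT A =====
-- A-side helpers: the two array-building loops of the Python.  Every list index the Python uses
-- is provably in range (i < n, i+1 ≤ n on lists of length n+1), so `getD _ 0` is exact here.
def buildLMaxes (nums : List Int) : List Int :=
  (List.range nums.length).foldl
    (fun lm i => lm.set (i + 1) (max (lm.getD i 0) (nums.getD i 0)))
    (List.replicate (nums.length + 1) 0)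

def buildRMaxes (nums : List Int) : List Int :=
  ((List.range nums.length).reverse).foldl
    (fun rm i => rm.set i (max (rm.getD (i + 1) 0) (nums.getD i 0)))
    (List.replicate (nums.length + 1) 0)

-- for i in range(1, n-1): ans += 1 if nums[i] < l_maxes[i] and nums[i] < r_maxes[i+1]
def bowlSubarrays (nums : List Int) : Int :=
  (List.range' 1 (nums.length - 2)).foldl
    (fun ans i =>
      if nums.getD i 0 < (buildLMaxes nums).getD i 0 ∧
         nums.getD i 0 < (buildRMaxes nums).getD (i + 1) 0
      then ans + 1 else ans)
    0

-- ===== PORT B =====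
-- sum(1 for i in range(1, n-1) if any(nums[j] > nums[i] for j in range(i))
--                              and any(nums[j] > nums[i] for j in range(i+1, n)))
def bowlSubarrays_alt (nums : List Int) : Int :=
  (List.range' 1 (nums.length - 2)).foldl
    (fun ans i =>
      if ((List.range i).any fun j => decide (nums.getD i 0 < nums.getD j 0)) &&
         ((List.range' (i + 1) (nums.length - (i + 1))).any fun j =>
             decide (nums.getD i 0 < nums.getD j 0))
      then ans + 1 else ans)
    0

-- ===== PRECONDITION & SPEC =====
-- On lists with an interior negative element that is >= every element on one of its sides, A still
-- counts that element (its max arrays are initialised with 0, so a negative value always tests as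
-- 'below the side maximum'), while B counts only elements with a strictly greater element on both
-- sides, which is the intended bowl condition.
def D_bowlSubarrays (nums : List Int) : Prop :=
  ∃ i < nums.length - 1, 0 < i ∧ nums.getD i 0 < 0 ∧
    ((nums.take (i + 1)).max? = nums[i]? ∨ (nums.drop i).max? = nums[i]?)
instance (nums : List Int) : Decidable (D_bowlSubarrays nums) := by
  unfold D_bowlSubarrays; infer_instance

def Spec_bowlSubarrays (nums : List Int) (out : Int) : Prop :=
  ¬ D_bowlSubarrays nums → out = bowlSubarrays_alt nums
instance (nums : List Int) (out : Int) : Decidable (Spec_bowlSubarrays nums out) := by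
  unfold Spec_bowlSubarrays; infer_instance

def pvDiffWitness_bowlSubarrays : List Int := [-5, -2, -5]
def pvDiffWitnessOut_bowlSubarrays : Int × Int := (1, 0)

-- ===== CLAIM (what is proved, stated in full; the proofs are below) =====
def Claim_unchanged_bowlSubarrays : Prop :=
  ∀ (nums : List Int), Dom_bowlSubarrays nums → Spec_bowlSubarrays nums (bowlSubarrays nums)
def Claim_changed_bowlSubarrays : Prop :=
  Dom_bowlSubarrays (pvDiffWitness_bowlSubarrays) ∧ D_bowlSubarrays (pvDiffWitness_bowlSubarrays) ∧
  bowlSubarrays (pvDiffWitness_bowlSubarrays) = pvDiffWitnessOut_bowlSubarrays.1 ∧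
  bowlSubarrays_alt (pvDiffWitness_bowlSubarrays) = pvDiffWitnessOut_bowlSubarrays.2 ∧
  pvDiffWitnessOut_bowlSubarrays.1 ≠ pvDiffWitnessOut_bowlSubarrays.2
def Claim_exact_bowlSubarrays : Prop :=
  ∀ (nums : List Int), Dom_bowlSubarrays nums → D_bowlSubarrays nums →
    bowlSubarrays nums ≠ bowlSubarrays_alt nums

-- ===== LEMMAS AND PROOFS =====

-- `M l` = the value `max(0, *l)` that A's arrays hold: fold of `max` started at 0.
def M (l : List Int) : Int := l.foldl max 0

theorem foldl_max_shift (l : List Int) (a b : Int) :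
    l.foldl max (max a b) = max a (l.foldl max b) := by
  induction l generalizing a b with
  | nil => rfl
  | cons x l ih => simp only [List.foldl_cons, max_assoc, ih]

theorem M_cons (c : Int) (l : List Int) : M (c :: l) = max c (M l) := by
  simp only [M, List.foldl_cons]
  rw [max_comm 0 c, foldl_max_shift]

theorem M_append (l : List Int) (c : Int) : M (l ++ [c]) = max (M l) c := by
  simp [M, List.foldl_append]

theorem lt_M_iff (v : Int) (l : List Int) : v < M l ↔ v < 0 ∨ ∃ x ∈ l, v < x := by
  induction l with
  | nil => simp [M]
  | cons c l ih =>
    rw [M_cons, lt_max_iff, ih]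
    constructor
    · rintro (h | h | ⟨x, hx, hvx⟩)
      · exact Or.inr ⟨c, List.mem_cons_self, h⟩
      · exact Or.inl h
      · exact Or.inr ⟨x, List.mem_cons_of_mem _ hx, hvx⟩
    · rintro (h | ⟨x, hx, hvx⟩)
      · exact Or.inr (Or.inl h)
      · rcases List.mem_cons.mp hx with rfl | hx
        · exact Or.inl hvx
        · exact Or.inr (Or.inr ⟨x, hx, hvx⟩)

theorem exists_mem_take_iff (nums : List Int) (i : Nat) (h : i ≤ nums.length) (v : Int) :
    (∃ x ∈ nums.take i, v < x) ↔ ∃ j, j < i ∧ v < nums.getD j 0 := by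
  constructor
  · rintro ⟨x, hx, hvx⟩
    obtain ⟨j, hj, rfl⟩ := List.mem_iff_getElem.mp hx
    have hj' : j < i := by have h2 := hj; simp [List.length_take] at h2; omega
    have hjlen : j < nums.length := lt_of_lt_of_le hj' h
    refine ⟨j, hj', ?_⟩
    rw [List.getD_eq_getElem _ _ hjlen]
    simpa [List.getElem_take] using hvx
  · rintro ⟨j, hj, hvj⟩
    have hjlen : j < nums.length := lt_of_lt_of_le hj h
    refine ⟨nums[j], ?_, ?_⟩
    · have hl : j < (nums.take i).length := by simp [List.length_take]; omega
      have : (nums.take i)[j]'hl = nums[j] := List.getElem_take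
      exact this ▸ List.getElem_mem _
    · rwa [List.getD_eq_getElem _ _ hjlen] at hvj

theorem exists_mem_drop_iff (nums : List Int) (i : Nat) (v : Int) :
    (∃ x ∈ nums.drop i, v < x) ↔ ∃ j, i ≤ j ∧ j < nums.length ∧ v < nums.getD j 0 := by
  constructor
  · rintro ⟨x, hx, hvx⟩
    obtain ⟨t, ht, rfl⟩ := List.mem_iff_getElem.mp hx
    have ht' : i + t < nums.length := by
      have := ht; simp [List.length_drop] at this; omega
    refine ⟨i + t, Nat.le_add_right _ _, ht', ?_⟩
    rw [List.getD_eq_getElem _ _ ht']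
    simpa [List.getElem_drop] using hvx
  · rintro ⟨j, hij, hjlen, hvj⟩
    refine ⟨nums[j], ?_, ?_⟩
    · have hlt : j - i < (nums.drop i).length := by simp [List.length_drop]; omega
      have : (nums.drop i)[j - i]'hlt = nums[i + (j - i)]'(by omega) := List.getElem_drop
      have hji : i + (j - i) = j := by omega
      rw [List.mem_iff_getElem]
      exact ⟨j - i, hlt, by simp [this, hji]⟩
    · rwa [List.getD_eq_getElem _ _ hjlen] at hvj

-- ---- characterisation of A's l_maxes array ----
def lmState (nums : List Int) (k : Nat) : List Int :=
  (List.range k).foldl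
    (fun lm i => lm.set (i + 1) (max (lm.getD i 0) (nums.getD i 0)))
    (List.replicate (nums.length + 1) 0)

theorem lmState_succ (nums : List Int) (k : Nat) :
    lmState nums (k + 1) =
      (lmState nums k).set (k + 1) (max ((lmState nums k).getD k 0) (nums.getD k 0)) := by
  simp [lmState, List.range_succ, List.foldl_append]

theorem lmState_length (nums : List Int) (k : Nat) :
    (lmState nums k).length = nums.length + 1 := by
  induction k with
  | zero => simp [lmState]
  | succ k ih => rw [lmState_succ, List.length_set]; exact ih

theorem getD_replicate_zero (m i : Nat) : (List.replicate m (0 : Int)).getD i 0 = 0 := by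
  rcases lt_or_ge i m with h | h
  · have hl : i < (List.replicate m (0 : Int)).length := by simpa using h
    rw [List.getD_eq_getElem _ _ hl]
    simp
  · rw [List.getD_eq_default]; simpa using h

theorem take_succ_concat (nums : List Int) (k : Nat) (h : k < nums.length) :
    nums.take (k + 1) = nums.take k ++ [nums.getD k 0] := by
  rw [List.take_succ, List.getD_eq_getElem _ _ h]
  simp [List.getElem?_eq_getElem h]

theorem lmState_getD (nums : List Int) (k : Nat) (hk : k ≤ nums.length) :
    ∀ i, i ≤ nums.length →
      (lmState nums k).getD i 0 = if i ≤ k then M (nums.take i) else 0 := by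
  induction k with
  | zero =>
    intro i _
    rcases Nat.eq_zero_or_pos i with rfl | hi
    · simp [lmState, getD_replicate_zero, M]
    · rw [if_neg (by omega)]; exact getD_replicate_zero _ _
  | succ k ih =>
    intro i hi
    have hk' : k ≤ nums.length := by omega
    have hklen : k < nums.length := by omega
    rw [lmState_succ]
    rcases eq_or_ne i (k + 1) with rfl | hne
    · rw [List.getD_eq_getElem _ _ (by simp [lmState_length]; omega)]
      rw [List.getElem_set_self (by simp [lmState_length]; omega)]
      rw [ih hk' k (by omega), if_pos (le_refl k), if_pos (le_refl (k+1))]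
      rw [take_succ_concat nums k hklen, M_append]
    · rw [List.getD_eq_getElem _ _ (by simp [lmState_length]; omega), List.getElem_set_ne (by omega)]
      rw [← List.getD_eq_getElem _ _ (show i < (lmState nums k).length by rw [lmState_length]; omega)]
      rw [ih hk' i hi]
      by_cases hik : i ≤ k
      · rw [if_pos hik, if_pos (by omega)]
      · rw [if_neg hik, if_neg (by omega)]

theorem buildLMaxes_getD (nums : List Int) (i : Nat) (hi : i ≤ nums.length) :
    (buildLMaxes nums).getD i 0 = M (nums.take i) := by
  have : buildLMaxes nums = lmState nums nums.length := rfl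
  rw [this, lmState_getD nums nums.length le_rfl i hi, if_pos hi]

-- ---- characterisation of A's r_maxes array ----
def rmState (nums : List Int) (k : Nat) : List Int :=
  ((List.range' k (nums.length - k)).reverse).foldl
    (fun rm i => rm.set i (max (rm.getD (i + 1) 0) (nums.getD i 0)))
    (List.replicate (nums.length + 1) 0)

theorem rmState_step (nums : List Int) (k : Nat) (h : k < nums.length) :
    rmState nums k =
      (rmState nums (k + 1)).set k
        (max ((rmState nums (k + 1)).getD (k + 1) 0) (nums.getD k 0)) := by
  have h1 : nums.length - k = (nums.length - (k + 1)) + 1 := by omega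
  simp [rmState, h1, List.range'_succ, List.foldl_append]

theorem rmState_length (nums : List Int) (k : Nat) :
    (rmState nums k).length = nums.length + 1 := by
  rcases Nat.le_total nums.length k with h | h
  · have : nums.length - k = 0 := by omega
    simp [rmState, this]
  · -- downward: induct on nums.length - k
    generalize hm : nums.length - k = m at *
    induction m generalizing k with
    | zero => simp [rmState, hm]
    | succ m ihm =>
      rw [rmState_step nums k (by omega), List.length_set]
      exact ihm (k + 1) (by omega) (by omega)


theorem drop_cons_getD (nums : List Int) (k : Nat) (h : k < nums.length) :
    nums.drop k = nums.getD k 0 :: nums.drop (k + 1) := by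
  rw [List.getD_eq_getElem _ _ h]
  exact (List.drop_eq_getElem_cons h)

theorem rmState_getD (nums : List Int) :
    ∀ m k, k + m = nums.length →
      ∀ i, i ≤ nums.length →
        (rmState nums k).getD i 0 = if k ≤ i then M (nums.drop i) else 0 := by
  intro m
  induction m with
  | zero =>
    intro k hk i hi
    have h0 : nums.length - k = 0 := by omega
    have : rmState nums k = List.replicate (nums.length + 1) 0 := by simp [rmState, h0]
    rw [this, getD_replicate_zero]
    rcases Nat.lt_or_ge i k with h | h
    · rw [if_neg (by omega)]
    · have : i = nums.length := by omega
      subst this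
      rw [if_pos (by omega)]
      simp [M]
  | succ m ihm =>
    intro k hk i hi
    have hklen : k < nums.length := by omega
    rw [rmState_step nums k hklen]
    have hlen' : (rmState nums (k + 1)).length = nums.length + 1 := rmState_length nums (k + 1)
    rcases eq_or_ne i k with rfl | hne
    · rw [List.getD_eq_getElem _ _ (by simp [hlen']; omega)]
      rw [List.getElem_set_self (by simp [hlen']; omega)]
      rw [ihm (i + 1) (by omega) (i + 1) (by omega), if_pos le_rfl, if_pos le_rfl]
      rw [drop_cons_getD nums i hklen, M_cons, max_comm]
    · rw [List.getD_eq_getElem _ _ (by simp [hlen']; omega)]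
      rw [List.getElem_set_ne (by omega)]
      rw [← List.getD_eq_getElem _ _ (show i < (rmState nums (k + 1)).length by rw [hlen']; omega)]
      rw [ihm (k + 1) (by omega) i hi]
      by_cases hki : k ≤ i
      · rw [if_pos (by omega : k + 1 ≤ i), if_pos hki]
      · rw [if_neg (by omega), if_neg hki]

theorem buildRMaxes_getD (nums : List Int) (i : Nat) (hi : i ≤ nums.length) :
    (buildRMaxes nums).getD i 0 = M (nums.drop i) := by
  have : buildRMaxes nums = rmState nums 0 := by
    simp [buildRMaxes, rmState, List.range_eq_range']
  rw [this, rmState_getD nums nums.length 0 (by omega) i hi, if_pos (Nat.zero_le i)]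

-- ---- counting folds as countP ----
theorem foldl_if_count (p : Nat → Prop) [DecidablePred p] :
    ∀ (l : List Nat) (a : Int),
      l.foldl (fun ans i => if p i then ans + 1 else ans) a
        = a + (l.countP fun i => decide (p i)) := by
  intro l
  induction l with
  | nil => intro a; simp
  | cons x l ih =>
    intro a
    rw [List.foldl_cons, ih, List.countP_cons]
    by_cases h : p x <;> simp [h] <;> push_cast <;> ring

-- the Bool predicates of the two ports, over `M`
def pA (nums : List Int) (i : Nat) : Bool :=
  decide (nums.getD i 0 < M (nums.take i) ∧ nums.getD i 0 < M (nums.drop (i + 1)))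

def qB (nums : List Int) (i : Nat) : Bool :=
  ((List.range i).any fun j => decide (nums.getD i 0 < nums.getD j 0)) &&
  ((List.range' (i + 1) (nums.length - (i + 1))).any fun j =>
      decide (nums.getD i 0 < nums.getD j 0))

theorem A_eq_countP (nums : List Int) :
    bowlSubarrays nums = ((List.range' 1 (nums.length - 2)).countP (pA nums) : Int) := by
  unfold bowlSubarrays
  rw [foldl_if_count
    (fun i => nums.getD i 0 < (buildLMaxes nums).getD i 0 ∧
              nums.getD i 0 < (buildRMaxes nums).getD (i + 1) 0)]
  rw [zero_add]
  congr 1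
  apply List.countP_congr
  intro i hi
  have hmem := List.mem_range'_1.mp hi
  have hi1 : 1 ≤ i := hmem.1
  have hi2 : i + 1 < nums.length := by omega
  rw [buildLMaxes_getD nums i (by omega), buildRMaxes_getD nums (i + 1) (by omega)]
  simp [pA]

theorem B_eq_countP (nums : List Int) :
    bowlSubarrays_alt nums = ((List.range' 1 (nums.length - 2)).countP (qB nums) : Int) := by
  unfold bowlSubarrays_alt
  rw [foldl_if_count (fun i =>
      (((List.range i).any fun j => decide (nums.getD i 0 < nums.getD j 0)) &&
       ((List.range' (i + 1) (nums.length - (i + 1))).any fun j =>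
           decide (nums.getD i 0 < nums.getD j 0))) = true)]
  rw [zero_add]
  congr 1
  apply List.countP_congr
  intro i _
  simp [qB]

-- pointwise bridges
theorem pA_iff (nums : List Int) (i : Nat) (h1 : 1 ≤ i) (h2 : i + 1 < nums.length) :
    pA nums i = true ↔
      ((nums.getD i 0 < 0 ∨ ∃ j, j < i ∧ nums.getD i 0 < nums.getD j 0) ∧
       (nums.getD i 0 < 0 ∨
         ∃ j, i + 1 ≤ j ∧ j < nums.length ∧ nums.getD i 0 < nums.getD j 0)) := by
  rw [pA, decide_eq_true_eq, lt_M_iff, lt_M_iff,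
    exists_mem_take_iff nums i (by omega), exists_mem_drop_iff]

theorem qB_iff (nums : List Int) (i : Nat) (h2 : i + 1 ≤ nums.length) :
    qB nums i = true ↔
      ((∃ j, j < i ∧ nums.getD i 0 < nums.getD j 0) ∧
       (∃ j, i + 1 ≤ j ∧ j < nums.length ∧ nums.getD i 0 < nums.getD j 0)) := by
  rw [qB, Bool.and_eq_true, List.any_eq_true, List.any_eq_true]
  constructor
  · rintro ⟨⟨j, hj, hcj⟩, ⟨j', hj', hcj'⟩⟩
    have hj1 := List.mem_range.mp hj
    have hj2 := List.mem_range'_1.mp hj'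
    exact ⟨⟨j, hj1, by simpa using hcj⟩, ⟨j', hj2.1, by omega, by simpa using hcj'⟩⟩
  · rintro ⟨⟨j, hj, hcj⟩, ⟨j', hj1, hj2, hcj'⟩⟩
    exact ⟨⟨j, List.mem_range.mpr hj, by simpa using hcj⟩,
           ⟨j', List.mem_range'_1.mpr ⟨hj1, by omega⟩, by simpa using hcj'⟩⟩

theorem anyL_iff (nums : List Int) (i : Nat) (h : i ≤ nums.length) :
    (nums.take i).any (fun x => decide (nums.getD i 0 < x)) = true ↔
      ∃ j, j < i ∧ nums.getD i 0 < nums.getD j 0 := by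
  rw [List.any_eq_true]
  simpa using exists_mem_take_iff nums i h (nums.getD i 0)

theorem anyR_iff (nums : List Int) (i : Nat) :
    (nums.drop (i + 1)).any (fun x => decide (nums.getD i 0 < x)) = true ↔
      ∃ j, i + 1 ≤ j ∧ j < nums.length ∧ nums.getD i 0 < nums.getD j 0 := by
  rw [List.any_eq_true]
  simpa using exists_mem_drop_iff nums (i + 1) (nums.getD i 0)

theorem leftmax_iff (nums : List Int) (i : Nat) (h : i < nums.length) :
    (nums.take (i + 1)).max? = nums[i]? ↔
      (nums.take i).any (fun x => decide (nums.getD i 0 < x)) = false := by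
  have hgd : nums.getD i 0 = nums[i] := List.getD_eq_getElem nums 0 h
  rw [List.getElem?_eq_getElem h, take_succ_concat nums i h, hgd,
    List.max?_eq_some_iff, List.any_eq_false]
  constructor
  · rintro ⟨_, hall⟩ x hx
    simpa using not_lt.mpr (hall x (List.mem_append_left _ hx))
  · intro hall
    refine ⟨List.mem_append_right _ (List.mem_singleton_self _), ?_⟩
    intro b hb
    rcases List.mem_append.mp hb with hb | hb
    · have := hall b hb
      simp at this
      omega
    · rw [List.mem_singleton.mp hb]

theorem rightmax_iff (nums : List Int) (i : Nat) (h : i < nums.length) :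
    (nums.drop i).max? = nums[i]? ↔
      (nums.drop (i + 1)).any (fun x => decide (nums.getD i 0 < x)) = false := by
  have hgd : nums.getD i 0 = nums[i] := List.getD_eq_getElem nums 0 h
  rw [List.getElem?_eq_getElem h, drop_cons_getD nums i h, hgd,
    List.max?_eq_some_iff, List.any_eq_false]
  constructor
  · rintro ⟨_, hall⟩ x hx
    simpa using not_lt.mpr (hall x (List.mem_cons_of_mem _ hx))
  · intro hall
    refine ⟨List.mem_cons_self, ?_⟩
    intro b hb
    rcases List.mem_cons.mp hb with rfl | hb
    · exact le_rfl
    · have := hall b hb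
      simp at this
      omega

theorem qB_imp_pA (nums : List Int) (i : Nat) (h1 : 1 ≤ i) (h2 : i + 1 < nums.length) :
    qB nums i = true → pA nums i = true := by
  intro h
  rw [qB_iff nums i (by omega)] at h
  rw [pA_iff nums i h1 h2]
  exact ⟨Or.inr h.1, Or.inr h.2⟩

theorem mem_idx_bounds {nums : List Int} {i : Nat}
    (hi : i ∈ List.range' 1 (nums.length - 2)) : 1 ≤ i ∧ i + 1 < nums.length := by
  have h := List.mem_range'_1.mp hi
  omega

-- strict countP comparison
theorem countP_lt_of (p q : Nat → Bool) :
    ∀ l : List Nat, (∀ a ∈ l, q a = true → p a = true) →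
      (∃ a ∈ l, p a = true ∧ q a = false) → l.countP q < l.countP p := by
  intro l
  induction l with
  | nil => rintro _ ⟨a, ha, _⟩; cases ha
  | cons x l ih =>
    rintro hmono ⟨a, ha, hpa, hqa⟩
    have hmono' : ∀ a ∈ l, q a = true → p a = true := fun a h => hmono a (List.mem_cons_of_mem _ h)
    have hle : l.countP q ≤ l.countP p := List.countP_mono_left hmono'
    rcases List.mem_cons.mp ha with rfl | ha'
    · rw [List.countP_cons, List.countP_cons, hpa, hqa]
      simpa using hle
    · have hlt := ih hmono' ⟨a, ha', hpa, hqa⟩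
      rw [List.countP_cons, List.countP_cons]
      have hq0 : (if q x = true then 1 else 0) ≤ (if p x = true then 1 else 0) := by
        by_cases hqx : q x = true
        · rw [if_pos hqx, if_pos (hmono x List.mem_cons_self hqx)]
        · rw [if_neg hqx]; split <;> omega
      omega

-- ===== VERDICT (by name: the statement is the Claim_ definition above) =====
theorem bowlSubarrays_spec : Claim_unchanged_bowlSubarrays := by
  intro nums _ hND
  rw [A_eq_countP, B_eq_countP]
  congr 1
  apply List.countP_congr
  intro i hi
  obtain ⟨h1, h2⟩ := mem_idx_bounds hi
  rw [pA_iff nums i h1 h2, qB_iff nums i (by omega)]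
  rcases lt_or_ge (nums.getD i 0) 0 with hneg | hpos
  · have hL : ∃ j, j < i ∧ nums.getD i 0 < nums.getD j 0 := by
      rw [← anyL_iff nums i (by omega)]
      by_contra hc
      rw [Bool.not_eq_true] at hc
      exact hND ⟨i, by omega, by omega, hneg,
        Or.inl ((leftmax_iff nums i (by omega)).mpr hc)⟩
    have hR : ∃ j, i + 1 ≤ j ∧ j < nums.length ∧ nums.getD i 0 < nums.getD j 0 := by
      rw [← anyR_iff nums i]
      by_contra hc
      rw [Bool.not_eq_true] at hc
      exact hND ⟨i, by omega, by omega, hneg,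
        Or.inr ((rightmax_iff nums i (by omega)).mpr hc)⟩
    constructor
    · intro _; exact ⟨hL, hR⟩
    · intro h; exact ⟨Or.inr h.1, Or.inr h.2⟩
  · constructor
    · rintro ⟨hl, hr⟩
      refine ⟨?_, ?_⟩
      · rcases hl with h | h
        · omega
        · exact h
      · rcases hr with h | h
        · omega
        · exact h
    · intro h; exact ⟨Or.inr h.1, Or.inr h.2⟩

theorem bowlSubarrays_changed : Claim_changed_bowlSubarrays := by
  unfold Claim_changed_bowlSubarrays; decide

theorem bowlSubarrays_tight : Claim_exact_bowlSubarrays := by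
  intro nums _ hD
  rw [A_eq_countP, B_eq_countP]
  obtain ⟨i, hi1, hi2, hneg, hside⟩ := hD
  have h1 : 1 ≤ i := hi2
  have h2 : i + 1 < nums.length := by omega
  have hlt : (List.range' 1 (nums.length - 2)).countP (qB nums)
      < (List.range' 1 (nums.length - 2)).countP (pA nums) := by
    apply countP_lt_of
    · intro a ha hqa
      obtain ⟨ha1, ha2⟩ := mem_idx_bounds ha
      exact qB_imp_pA nums a ha1 ha2 hqa
    · refine ⟨i, List.mem_range'_1.mpr ⟨h1, by omega⟩, ?_, ?_⟩
      · rw [pA_iff nums i h1 h2]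
        exact ⟨Or.inl hneg, Or.inl hneg⟩
      · rw [← Bool.not_eq_true, qB_iff nums i (by omega)]
        rintro ⟨hexl, hexr⟩
        rcases hside with hL | hR
        · have hc := (anyL_iff nums i (by omega)).mpr hexl
          rw [(leftmax_iff nums i (by omega)).mp hL] at hc
          cases hc
        · have hc := (anyR_iff nums i).mpr hexr
          rw [(rightmax_iff nums i (by omega)).mp hR] at hc
          cases hc
  intro hEq
  have : (List.range' 1 (nums.length - 2)).countP (pA nums)
      = (List.range' 1 (nums.length - 2)).countP (qB nums) := by exact_mod_cast hEq
  omega
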